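-- pv_equiv track=rewrite | github.com/marufnsu/LeetCodeSolutions | CodeSignal/Trees/findSubstrings.py | solution
-- ===== SOURCE A (Python) =====
-- def solution(words, parts):
--     # Convert parts list to a set for efficient lookup
--     parts = set(parts)
--     # Initialize an empty list to store the modified words
--     ans = []
--     # Iterate through each word in the words array
--     for s in words:
--         # Start with the maximum possible length of the part substring
--         length = 5
--         # Iterate from maximum to minimum length to find the longest part substring
--         while length > 0:
--             # Flag to check if a part substring is found
--             ok = False
--             # Iterate through all possible starting indices of substrings of length 'length' in the word
--             for i in range(len(s) - length + 1):
--                 # Check if the substring starting at index 'i' with length 'length' is in the parts set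
--                 if s[i:][:length] in parts:
--                     # If found, modify the word by enclosing the part substring within square brackets
--                     s = s[:i] + '[%s]' % s[i:][:length] + s[i + length:]
--                     # Set flag to True indicating that a part substring is found
--                     ok = True
--                     # Exit the inner loop as we found the longest part substring
--                     break
--
--             # If a part substring is found, exit the outer loop
--             if ok:
--                 break
--
--             # Decrement the length to check for shorter part substrings
--             length -= 1
--
--         # Add the modified word to the result list
--         ans += [s]
--
--     # Return the list of modified words
--     return ans
-- ===== SOURCE B (Python) =====
-- def solution(words, parts):
--     pset = set(parts)
--     out = []
--     for s in words:
--         best = None  # (start, length) of the winner so far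
--         for i in range(len(s)):
--             for L in range(1, min(5, len(s) - i) + 1):
--                 if s[i:i + L] in pset and (best is None or best[1] < L):
--                     best = (i, L)
--         if best is None:
--             out.append(s)
--         else:
--             i, L = best
--             out.append(s[:i] + '[' + s[i:i + L] + ']' + s[i + L:])
--     return out
-- ===== Notes on version B (the rewrite author's own statement) =====
-- stated objective: alternative
-- what changed: A rewrites the word inside a length-countdown loop (5..1) whose inner index scan breaks at the first hit; B makes one start-major forward scan keeping a best-(start,length) accumulator updated only on strictly longer matches (which yields longest-then-leftmost automatically) and builds the bracketed word once at the end.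
import Mathlib
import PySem

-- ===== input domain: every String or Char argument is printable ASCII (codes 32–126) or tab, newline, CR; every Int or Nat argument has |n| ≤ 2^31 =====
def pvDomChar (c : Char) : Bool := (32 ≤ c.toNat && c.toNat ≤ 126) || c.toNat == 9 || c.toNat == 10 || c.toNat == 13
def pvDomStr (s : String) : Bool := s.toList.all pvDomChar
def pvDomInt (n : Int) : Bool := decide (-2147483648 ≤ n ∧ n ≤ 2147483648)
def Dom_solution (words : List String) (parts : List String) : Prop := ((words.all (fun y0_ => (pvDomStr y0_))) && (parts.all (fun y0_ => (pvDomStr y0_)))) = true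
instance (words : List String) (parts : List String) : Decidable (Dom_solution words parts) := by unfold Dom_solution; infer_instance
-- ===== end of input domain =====

-- B replaces A's length-countdown with two breaks by a single start-major scan keeping a
-- best-(start,length) accumulator updated on strictly longer matches (objective: alternative decomposition).
-- Strings are processed as their code-point lists (String.toList / String.ofList) — exact for Python str.

-- ===== PORT A =====
-- per-word loop of A: 'length' counts down 5,4,3,2,1; the inner 'for i in range(len(s)-length+1)'
-- with break is the first index whose slice is in the parts set.
def solWordA (pset : List (List Char)) : List Char → Nat → List Char
  | cs, 0 => cs
  | cs, Nat.succ k =>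
    let L : Int := (k + 1 : Nat)
    match (PySem.List.pyRange 0 ((cs.length : Int) - L + 1) 1).find?
        (fun i => PySem.Set.contains pset
          (PySem.List.slice (PySem.List.slice cs (some i) none) none (some L))) with
    | some i =>
        PySem.List.slice cs none (some i)
          ++ ('[' :: PySem.List.slice (PySem.List.slice cs (some i) none) none (some L) ++ [']'])
          ++ PySem.List.slice cs (some (i + L)) none
    | none => solWordA pset cs k

def solution (words : List String) (parts : List String) : List String :=
  let pset := PySem.Set.ofList (parts.map String.toList)
  words.foldl (fun ans s => ans ++ [String.ofList (solWordA pset s.toList 5)]) []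

-- ===== PORT B =====
-- Source B's nested 'for i … for L …' scan with the 'best' accumulator, updated only when the
-- slice is a part and (best is None or best[1] < L).
def bestB (pset : List (List Char)) (cs : List Char) : Option (Int × Int) :=
  (PySem.List.pyRange 0 (cs.length : Int) 1).foldl (fun best i =>
    (PySem.List.pyRange 1 (min 5 ((cs.length : Int) - i) + 1) 1).foldl (fun b L =>
      if PySem.Set.contains pset (PySem.List.slice cs (some i) (some (i + L)))
          && (match b with | none => true | some p => decide (p.2 < L))
      then some (i, L) else b) best) none

def solution_alt (words : List String) (parts : List String) : List String :=
  let pset := PySem.Set.ofList (parts.map String.toList)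
  words.map (fun s =>
    match bestB pset s.toList with
    | none => s
    | some (i, L) =>
        String.ofList (PySem.List.slice s.toList none (some i)
          ++ '[' :: PySem.List.slice s.toList (some i) (some (i + L)) ++ [']']
          ++ PySem.List.slice s.toList (some (i + L)) none))

-- ===== PRECONDITION & SPEC =====
def Spec_solution (words : List String) (parts : List String) (out : List String) : Prop := out = solution_alt words parts
instance (words : List String) (parts : List String) (out : List String) : Decidable (Spec_solution words parts out) := by unfold Spec_solution; infer_instance

-- ===== CLAIM (what is proved, stated in full; the proofs are below) =====
def Claim_equal_solution : Prop := ∀ (words : List String) (parts : List String), Dom_solution words parts → Spec_solution words parts (solution words parts)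

-- ===== LEMMAS AND PROOFS =====

-- the membership test both programs make, as a predicate on (start, length)
def cand (pset : List (List Char)) (cs : List Char) (i L : Int) : Bool :=
  PySem.Set.contains pset (PySem.List.slice cs (some i) (some (i + L)))

-- A's inner scan at one length: first matching start
def fnd (pset : List (List Char)) (cs : List Char) (L : Int) : Option Int :=
  (PySem.List.pyRange 0 ((cs.length : Int) - L + 1) 1).find? (fun i => cand pset cs i L)

-- A's countdown selection
def sel (pset : List (List Char)) (cs : List Char) : Nat → Option (Int × Int)
  | 0 => none
  | Nat.succ k =>
    match fnd pset cs (k + 1 : Nat) with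
    | some i => some ((k + 1 : Nat), i)
    | none => sel pset cs k

-- B's candidate group at one start i (in inner traversal order), and the flattened candidate list
def grpB (pset : List (List Char)) (cs : List Char) (i : Int) : List (Int × Int) :=
  (PySem.List.pyRange 1 (min 5 ((cs.length : Int) - i) + 1) 1).filterMap (fun L =>
    if cand pset cs i L then some (i, L) else none)

def pairs (pset : List (List Char)) (cs : List Char) : List (Int × Int) :=
  (PySem.List.pyRange 0 (cs.length : Int) 1).flatMap (grpB pset cs)

-- B's accumulator update, isolated
def upd (b : Option (Int × Int)) (q : Int × Int) : Option (Int × Int) :=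
  if (match b with | none => true | some p => decide (p.2 < q.2)) then some q else b

-- the two slice expressions agree at a nonnegative start
theorem slice_slice_eq (cs : List Char) (i L : Int) (hi : 0 ≤ i) (hL : 0 ≤ L) :
    PySem.List.slice (PySem.List.slice cs (some i) none) none (some L)
      = PySem.List.slice cs (some i) (some (i + L)) := by
  rw [PySem.List.slice_from cs hi, PySem.List.slice_to _ hL,
    PySem.List.slice_toNat cs hi (by omega)]
  congr 1
  omega

-- find? congruence under a pointwise-equal predicate
theorem find?_congr' {α : Type} (l : List α) (p q : α → Bool) (h : ∀ x ∈ l, p x = q x) :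
    l.find? p = l.find? q := by
  induction l with
  | nil => rfl
  | cons a t ih =>
    rw [List.find?_cons, List.find?_cons, h a (by simp)]
    cases hq : q a
    · exact ih (fun x hx => h x (by simp [hx]))
    · rfl

-- on a strictly sorted list, everything smaller than the found element fails the predicate
theorem find?_some_earlier {l : List Int} {p : Int → Bool} {i : Int}
    (hl : l.Pairwise (· < ·)) (h : l.find? p = some i) :
    ∀ j ∈ l, j < i → p j = false := by
  induction l with
  | nil => simp at h
  | cons a t ih =>
    rcases List.pairwise_cons.mp hl with ⟨ha, ht⟩
    intro j hj hji
    by_cases hp : p a = true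
    · rw [List.find?_cons_of_pos hp] at h
      have : a = i := Option.some.inj h
      subst this
      rcases List.mem_cons.mp hj with rfl | hjt
      · omega
      · exact absurd (ha j hjt) (by omega)
    · rw [List.find?_cons_of_neg hp] at h
      rcases List.mem_cons.mp hj with rfl | hjt
      · simpa using hp
      · exact ih ht h j hjt hji

-- fnd characterisations
theorem fnd_some_spec (pset : List (List Char)) (cs : List Char) (L i : Int)
    (h : fnd pset cs L = some i) :
    0 ≤ i ∧ i + L ≤ (cs.length : Int) ∧ cand pset cs i L = true ∧
      ∀ j, 0 ≤ j → j < i → cand pset cs j L = false := by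
  unfold fnd at h
  have hp := List.find?_some (p := fun j => cand pset cs j L) h
  have hm := List.mem_of_find?_eq_some h
  have hb := PySem.List.mem_pyRange_one.mp hm
  refine ⟨hb.1, by omega, hp, ?_⟩
  intro j hj hji
  exact find?_some_earlier (PySem.List.pairwise_lt_pyRange_one 0 _) h j
    (PySem.List.mem_pyRange_one.mpr ⟨hj, by omega⟩) hji

theorem fnd_none_spec (pset : List (List Char)) (cs : List Char) (L : Int)
    (h : fnd pset cs L = none) :
    ∀ i, 0 ≤ i → i + L ≤ (cs.length : Int) → cand pset cs i L = false := by
  intro i hi hiL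
  have := List.find?_eq_none.mp h i (PySem.List.mem_pyRange_one.mpr ⟨hi, by omega⟩)
  simpa using this

-- sel characterisation (countdown): the found length is maximal among lengths ≤ k
theorem sel_none_spec (pset : List (List Char)) (cs : List Char) (k : Nat)
    (h : sel pset cs k = none) :
    ∀ L : Int, 1 ≤ L → L ≤ (k : Int) → fnd pset cs L = none := by
  induction k with
  | zero => intro L h1 h2; omega
  | succ n ih =>
    intro L h1 h2
    unfold sel at h
    rcases hf : fnd pset cs ((n + 1 : Nat) : Int) with _ | i
    · rw [hf] at h
      by_cases hL : L = ((n + 1 : Nat) : Int)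
      · rw [hL]; exact hf
      · exact ih h L h1 (by push_cast at h2 ⊢; omega)
    · rw [hf] at h; simp at h

theorem sel_some_spec (pset : List (List Char)) (cs : List Char) (k : Nat) (L i : Int)
    (h : sel pset cs k = some (L, i)) :
    1 ≤ L ∧ L ≤ (k : Int) ∧ fnd pset cs L = some i ∧
      ∀ L' : Int, L < L' → L' ≤ (k : Int) → fnd pset cs L' = none := by
  induction k with
  | zero => simp [sel] at h
  | succ n ih =>
    unfold sel at h
    rcases hf : fnd pset cs ((n + 1 : Nat) : Int) with _ | j
    · rw [hf] at h
      rcases ih h with ⟨h1, h2, h3, h4⟩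
      refine ⟨h1, by push_cast at h2 ⊢; omega, h3, ?_⟩
      intro L' hL' hL'k
      by_cases hE : L' = ((n + 1 : Nat) : Int)
      · rw [hE]; exact hf
      · exact h4 L' hL' (by push_cast at hL'k h2 ⊢; omega)
    · rw [hf] at h
      injection Option.some.inj h with h1 h2
      subst h1
      subst h2
      refine ⟨by push_cast; omega, le_refl _, hf, ?_⟩
      intro L' hL' hL'k
      omega

-- membership in a grpB group
theorem mem_grpB (pset : List (List Char)) (cs : List Char) (i : Int) (q : Int × Int)
    (h : q ∈ grpB pset cs i) :
    q.1 = i ∧ 1 ≤ q.2 ∧ q.2 ≤ 5 ∧ i + q.2 ≤ (cs.length : Int) ∧ cand pset cs i q.2 = true := by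
  rcases List.mem_filterMap.mp h with ⟨L, hL, hq⟩
  have hb := PySem.List.mem_pyRange_one.mp hL
  have hmin : L ≤ min 5 ((cs.length : Int) - i) := by omega
  have h5 : L ≤ (5 : Int) := le_trans hmin (min_le_left _ _)
  have hn : L ≤ (cs.length : Int) - i := le_trans hmin (min_le_right _ _)
  by_cases hc : cand pset cs i L = true
  · simp only [hc, if_true, Option.some.injEq] at hq
    subst hq
    exact ⟨rfl, hb.1, h5, by omega, hc⟩
  · simp [hc] at hq

-- B's nested foldl is foldl of upd over the flattened candidate list
theorem inner_foldl_eq (pset : List (List Char)) (cs : List Char) (i : Int)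
    (l : List Int) (acc : Option (Int × Int)) :
    l.foldl (fun b L =>
      if cand pset cs i L && (match b with | none => true | some p => decide (p.2 < L))
      then some (i, L) else b) acc
    = (l.filterMap (fun L => if cand pset cs i L then some (i, L) else none)).foldl upd acc := by
  induction l generalizing acc with
  | nil => rfl
  | cons L t ih =>
    by_cases hc : cand pset cs i L = true
    · simp only [List.foldl_cons, List.filterMap_cons, hc, if_true, Bool.true_and]
      rw [ih]
      rfl
    · simp only [List.foldl_cons, List.filterMap_cons, hc]
      simp only [Bool.false_eq_true, if_false, Bool.false_and]
      exact ih acc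

-- foldl over a flatMap is the nested foldl (shape of B's two nested loops)
theorem foldl_flatMap' {a b g : Type} (l : List a) (f : a -> List b) (st : g -> b -> g) (init : g) :
    (l.flatMap f).foldl st init = l.foldl (fun acc x => (f x).foldl st acc) init := by
  induction l generalizing init with
  | nil => rfl
  | cons x t ih => simp only [List.flatMap_cons, List.foldl_append, List.foldl_cons, ih]

theorem bestB_eq_foldl_pairs (pset : List (List Char)) (cs : List Char) :
    bestB pset cs = (pairs pset cs).foldl upd none := by
  unfold bestB pairs
  rw [foldl_flatMap']
  apply PySem.List.foldl_congr_mem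
  intro b i _
  exact inner_foldl_eq pset cs i _ b

-- upd-foldl facts
theorem foldl_upd_keep (l : List (Int × Int)) (p : Int × Int)
    (h : ∀ q ∈ l, q.2 ≤ p.2) :
    l.foldl upd (some p) = some p := by
  induction l with
  | nil => rfl
  | cons q t ih =>
    have hq := h q (by simp)
    have : upd (some p) q = some p := by
      simp only [upd]
      simp [not_lt.mpr hq]
    rw [List.foldl_cons, this]
    exact ih (fun r hr => h r (by simp [hr]))

theorem foldl_upd_mem (l : List (Int × Int)) (acc : Option (Int × Int)) (m : Int × Int)
    (h : l.foldl upd acc = some m) : m ∈ l ∨ acc = some m := by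
  induction l generalizing acc with
  | nil => simp at h; simp [h]
  | cons q t ih =>
    rw [List.foldl_cons] at h
    rcases ih _ h with hm | hm
    · exact Or.inl (List.mem_cons_of_mem _ hm)
    · rcases acc with _ | p
      · rw [show upd none q = some q from rfl] at hm
        exact Or.inl ((Option.some.inj hm) ▸ List.mem_cons_self)
      · by_cases hc : p.2 < q.2
        · rw [show upd (some p) q = some q from by simp [upd, hc]] at hm
          exact Or.inl ((Option.some.inj hm) ▸ List.mem_cons_self)
        · rw [show upd (some p) q = some p from by simp [upd, hc]] at hm
          exact Or.inr hm

theorem foldl_upd_first_max (l1 : List (Int × Int)) (p : Int × Int) (l2 : List (Int × Int))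
    (h1 : ∀ q ∈ l1, q.2 < p.2) (h2 : ∀ q ∈ l2, q.2 ≤ p.2) :
    (l1 ++ p :: l2).foldl upd none = some p := by
  rw [List.foldl_append, List.foldl_cons]
  have hstep : upd (l1.foldl upd none) p = some p := by
    rcases hr : l1.foldl upd none with _ | q
    · rfl
    · rcases foldl_upd_mem l1 none q hr with hq | hq
      · simp only [upd]
        simp [h1 q hq]
      · simp at hq
  rw [hstep]
  exact foldl_upd_keep l2 p h2

-- every flattened candidate is a genuine match within bounds
theorem mem_pairs (pset : List (List Char)) (cs : List Char) (q : Int × Int)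
    (h : q ∈ pairs pset cs) :
    0 ≤ q.1 ∧ 1 ≤ q.2 ∧ q.2 ≤ 5 ∧ q.1 + q.2 ≤ (cs.length : Int) ∧ cand pset cs q.1 q.2 = true := by
  rcases List.mem_flatMap.mp h with ⟨i, hi, hg⟩
  rcases mem_grpB pset cs i q hg with ⟨h1, h2, h3, h4, h5⟩
  have hb := PySem.List.mem_pyRange_one.mp hi
  subst h1
  exact ⟨hb.1, h2, h3, h4, h5⟩

-- under the maximality facts of sel, every candidate's length is at most L
theorem cand_le (pset : List (List Char)) (cs : List Char) (L : Int)
    (hmax : ∀ L' : Int, L < L' → L' ≤ (5 : Int) → fnd pset cs L' = none)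
    (q : Int × Int) (hq : q ∈ pairs pset cs) : q.2 ≤ L := by
  rcases mem_pairs pset cs q hq with ⟨h0, h1, h5, hn, hc⟩
  by_contra hgt
  have := fnd_none_spec pset cs q.2 (hmax q.2 (by omega) h5) q.1 h0 hn
  rw [hc] at this
  exact Bool.true_eq_false.mp this

-- the central per-word selection equivalence
theorem bestB_eq_sel (pset : List (List Char)) (cs : List Char) :
    bestB pset cs = (sel pset cs 5).map (fun p => (p.2, p.1)) := by
  rw [bestB_eq_foldl_pairs]
  rcases hs : sel pset cs 5 with _ | ⟨L, i⟩
  · -- no candidate anywhere: every group is empty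
    have hnone := sel_none_spec pset cs 5 hs
    have hpairs : pairs pset cs = [] := by
      unfold pairs
      rw [List.flatMap_eq_nil_iff]
      intro i hi
      unfold grpB
      apply List.filterMap_eq_nil_iff.mpr
      intro L hL
      have hbi := PySem.List.mem_pyRange_one.mp hi
      have hbL := PySem.List.mem_pyRange_one.mp hL
      have hmin : L ≤ min 5 ((cs.length : Int) - i) := by omega
      have h5 : L ≤ (5 : Int) := le_trans hmin (min_le_left _ _)
      have hn : L ≤ (cs.length : Int) - i := le_trans hmin (min_le_right _ _)
      have hf := hnone L hbL.1 (by push_cast; omega)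
      have := fnd_none_spec pset cs L hf i hbi.1 (by omega)
      simp [this]
    rw [hpairs]
    rfl
  · rcases sel_some_spec pset cs 5 L i hs with ⟨hL1, hL5, hfi, hmax⟩
    rcases fnd_some_spec pset cs L i hfi with ⟨hi0, hiL, hci, hfirst⟩
    have hL5' : L ≤ (5 : Int) := by push_cast at hL5; omega
    have hin : i < (cs.length : Int) := by omega
    -- split the outer range at i
    have houter : PySem.List.pyRange 0 (cs.length : Int) 1
        = PySem.List.pyRange 0 i 1 ++ i :: PySem.List.pyRange (i + 1) (cs.length : Int) 1 := by
      rw [PySem.List.pyRange_one_append 0 i (cs.length : Int) hi0 (by omega),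
        PySem.List.pyRange_one_cons (a := i) (b := (cs.length : Int)) hin]
    -- split the inner range of group i at L
    have hLmin : L ≤ min 5 ((cs.length : Int) - i) := le_min hL5' (by omega)
    have hinner : PySem.List.pyRange 1 (min 5 ((cs.length : Int) - i) + 1) 1
        = PySem.List.pyRange 1 L 1 ++ L :: PySem.List.pyRange (L + 1) (min 5 ((cs.length : Int) - i) + 1) 1 := by
      rw [PySem.List.pyRange_one_append 1 L (min 5 ((cs.length : Int) - i) + 1) hL1
          (le_trans hLmin (by omega)),
        PySem.List.pyRange_one_cons (a := L) (b := min 5 ((cs.length : Int) - i) + 1)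
          (Int.lt_add_one_iff.mpr hLmin)]
    have hgrp : grpB pset cs i
        = (PySem.List.pyRange 1 L 1).filterMap (fun L' => if cand pset cs i L' then some (i, L') else none)
          ++ (i, L) :: (PySem.List.pyRange (L + 1) (min 5 ((cs.length : Int) - i) + 1) 1).filterMap
              (fun L' => if cand pset cs i L' then some (i, L') else none) := by
      unfold grpB
      rw [hinner, List.filterMap_append, List.filterMap_cons]
      simp [hci]
    have hpairs : pairs pset cs
        = ((PySem.List.pyRange 0 i 1).flatMap (grpB pset cs)
            ++ (PySem.List.pyRange 1 L 1).filterMap (fun L' => if cand pset cs i L' then some (i, L') else none))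
          ++ (i, L) :: ((PySem.List.pyRange (L + 1) (min 5 ((cs.length : Int) - i) + 1) 1).filterMap
              (fun L' => if cand pset cs i L' then some (i, L') else none)
            ++ (PySem.List.pyRange (i + 1) (cs.length : Int) 1).flatMap (grpB pset cs)) := by
      unfold pairs
      rw [houter, List.flatMap_append, List.flatMap_cons, hgrp]
      simp
    rw [hpairs, foldl_upd_first_max]
    · rfl
    · -- everything traversed before (i, L) has a strictly smaller length
      intro q hq
      rcases List.mem_append.mp hq with hq | hq
      · -- an earlier start i' < i: q.2 ≠ L by hfirst, q.2 ≤ L by maximality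
        rcases List.mem_flatMap.mp hq with ⟨i', hi', hg⟩
        rcases mem_grpB pset cs i' q hg with ⟨h1, h2, h3, h4, h5⟩
        have hb := PySem.List.mem_pyRange_one.mp hi'
        have hle : q.2 ≤ L := cand_le pset cs L hmax q
          (List.mem_flatMap.mpr ⟨i', PySem.List.mem_pyRange_one.mpr ⟨hb.1, by omega⟩, hg⟩)
        rcases lt_or_eq_of_le hle with hlt | heq
        · exact hlt
        · exfalso
          have := hfirst i' hb.1 hb.2
          rw [heq] at h5
          rw [h5] at this
          exact Bool.true_eq_false.mp this
      · -- same start i, a shorter length L' < L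
        rcases List.mem_filterMap.mp hq with ⟨L', hL', hqe⟩
        have hb := PySem.List.mem_pyRange_one.mp hL'
        by_cases hc : cand pset cs i L' = true
        · simp only [hc, if_true, Option.some.injEq] at hqe
          subst hqe
          exact hb.2
        · simp [hc] at hqe
    · -- everything after (i, L) has length at most L
      intro q hq
      rcases List.mem_append.mp hq with hq | hq
      · rcases List.mem_filterMap.mp hq with ⟨L', hL', hqe⟩
        have hb := PySem.List.mem_pyRange_one.mp hL'
        have hmin' : L' ≤ min 5 ((cs.length : Int) - i) := by omega
        have h5' : L' ≤ (5 : Int) := le_trans hmin' (min_le_left _ _)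
        have hn' : L' ≤ (cs.length : Int) - i := le_trans hmin' (min_le_right _ _)
        by_cases hc : cand pset cs i L' = true
        · exfalso
          have := fnd_none_spec pset cs L' (hmax L' (by omega) (by push_cast; omega)) i hi0 (by omega)
          rw [hc] at this
          exact Bool.true_eq_false.mp this
        · simp [hc] at hqe
      · rcases List.mem_flatMap.mp hq with ⟨i', hi', hg⟩
        have hb := PySem.List.mem_pyRange_one.mp hi'
        exact cand_le pset cs L hmax q
          (List.mem_flatMap.mpr ⟨i', PySem.List.mem_pyRange_one.mpr ⟨by omega, by omega⟩, hg⟩)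

-- A's predicate rewritten with the direct slice (for indices in the range)
theorem fndA_eq (pset : List (List Char)) (cs : List Char) (L : Int) (hL : 0 ≤ L) :
    (PySem.List.pyRange 0 ((cs.length : Int) - L + 1) 1).find?
        (fun i => PySem.Set.contains pset
          (PySem.List.slice (PySem.List.slice cs (some i) none) none (some L)))
      = fnd pset cs L := by
  unfold fnd
  apply find?_congr'
  intro i hi
  have h0 : 0 ≤ i := (PySem.List.mem_pyRange_one.mp hi).1
  unfold cand
  rw [slice_slice_eq cs i L h0 hL]

theorem fnd_nonneg (pset : List (List Char)) (cs : List Char) (L i : Int)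
    (h : fnd pset cs L = some i) : 0 ≤ i :=
  (fnd_some_spec pset cs L i h).1

-- A's per-word countdown expressed through sel
theorem word_eq_aux (pset : List (List Char)) (cs : List Char) (k : Nat) :
    solWordA pset cs k =
      match sel pset cs k with
      | none => cs
      | some (L, i) =>
          PySem.List.slice cs none (some i)
            ++ ('[' :: PySem.List.slice cs (some i) (some (i + L)) ++ [']'])
            ++ PySem.List.slice cs (some (i + L)) none := by
  induction k with
  | zero => rfl
  | succ n ih =>
    show (match (PySem.List.pyRange 0 ((cs.length : Int) - ((n + 1 : Nat) : Int) + 1) 1).find?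
        (fun i => PySem.Set.contains pset
          (PySem.List.slice (PySem.List.slice cs (some i) none) none (some ((n + 1 : Nat) : Int)))) with
      | some i =>
          PySem.List.slice cs none (some i)
            ++ ('[' :: PySem.List.slice (PySem.List.slice cs (some i) none) none (some ((n + 1 : Nat) : Int)) ++ [']'])
            ++ PySem.List.slice cs (some (i + ((n + 1 : Nat) : Int))) none
      | none => solWordA pset cs n) = _
    rw [fndA_eq pset cs _ (Int.natCast_nonneg _)]
    rcases hf : fnd pset cs ((n + 1 : Nat) : Int) with _ | i
    · simp only [sel, hf]
      exact ih
    · simp only [sel, hf]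
      rw [slice_slice_eq cs i _ (fnd_nonneg pset cs _ i hf) (Int.natCast_nonneg _)]

-- per-word equivalence of the two ports
theorem word_eq (pset : List (List Char)) (cs : List Char) :
    solWordA pset cs 5 =
      match bestB pset cs with
      | none => cs
      | some (i, L) =>
          PySem.List.slice cs none (some i)
            ++ '[' :: PySem.List.slice cs (some i) (some (i + L)) ++ [']']
            ++ PySem.List.slice cs (some (i + L)) none := by
  rw [word_eq_aux pset cs 5, bestB_eq_sel]
  rcases sel pset cs 5 with _ | ⟨L, i⟩
  · rfl
  · simp

theorem foldl_append_map' {a b : Type} (f : a → b) (l : List a) (init : List b) :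
    l.foldl (fun ans s => ans ++ [f s]) init = init ++ l.map f := by
  induction l generalizing init with
  | nil => simp
  | cons x t ih => simp [ih]

-- ===== VERDICT (by name: the statement is the Claim_ definition above) =====
theorem solution_spec : Claim_equal_solution := by
  intro words parts _
  show solution words parts = solution_alt words parts
  unfold solution solution_alt
  rw [foldl_append_map']
  simp only [List.nil_append]
  apply List.map_congr_left
  intro s _
  rw [word_eq]
  rcases bestB (PySem.Set.ofList (parts.map String.toList)) s.toList with _ | ⟨i, L⟩
  · simp
  · simp
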